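-- pv_equiv track=rewrite | github.com/githubtijn2002/Pose_estimation_squat | functions/processing/keypoints.py | get_start_end_indices
-- ===== SOURCE A (Python) =====
-- def get_start_end_indices(indices):
--     """Get start and end indices for each rep."""
--     indices = sorted(indices)
--     start = []
--     end = []
--     for i in range(len(indices)):
--         if i == 0 or indices[i] != indices[i-1] + 1:
--             start.append(indices[i])
--         if i == len(indices) - 1 or indices[i] != indices[i+1] - 1:
--             end.append(indices[i])
--     return start, end
-- ===== SOURCE B (Python) =====
-- def get_start_end_indices(indices):
--     """Get start and end indices for each rep: group sorted indices into maximal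
--     consecutive runs first, then read off each run's first and last element."""
--     xs = sorted(indices)
--     runs = []
--     for v in xs:
--         if runs and v == runs[-1][-1] + 1:
--             runs[-1].append(v)
--         else:
--             runs.append([v])
--     return [r[0] for r in runs], [r[-1] for r in runs]
-- ===== Notes on version B (the rewrite author's own statement) =====
-- stated objective: idiomatic
-- what changed: B first partitions the sorted indices into explicit maximal consecutive runs and then extracts each run's first and last element in separate passes, instead of A's single index loop that flags starts and ends by comparing xs[i] with xs[i-1]+1 and xs[i+1]-1.
import Mathlib
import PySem

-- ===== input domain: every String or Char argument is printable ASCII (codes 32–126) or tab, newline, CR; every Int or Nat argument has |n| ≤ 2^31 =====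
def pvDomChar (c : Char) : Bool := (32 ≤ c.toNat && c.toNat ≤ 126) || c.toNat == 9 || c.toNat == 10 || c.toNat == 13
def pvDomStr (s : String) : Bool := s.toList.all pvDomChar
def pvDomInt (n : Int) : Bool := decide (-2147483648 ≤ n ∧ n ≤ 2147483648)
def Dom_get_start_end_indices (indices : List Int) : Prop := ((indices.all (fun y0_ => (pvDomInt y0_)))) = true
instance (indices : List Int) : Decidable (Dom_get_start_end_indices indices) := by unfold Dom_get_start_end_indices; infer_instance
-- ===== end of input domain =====

-- B groups the sorted indices into explicit maximal consecutive runs and reads off each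
-- run's endpoints afterwards, instead of A's interleaved start/end flagging index loop
-- (objective: a more idiomatic decomposition; same cost).

-- ===== PORT A =====
-- literal transliteration of A: sort, then for each index i flag a start and/or an end.
-- xs[i], xs[i-1], xs[i+1] are ported with pyGetD; every such access Python performs is
-- in range (the guards short-circuit), so the default is never returned.
def get_start_end_indices (indices : List Int) : List Int × List Int :=
  let xs := PySem.List.sorted indices (fun x => x) false
  let n : Int := (xs.length : Int)
  (PySem.List.pyRange 0 n 1).foldl
    (fun (acc : List Int × List Int) i =>
      let acc := if i = 0 ∨ PySem.List.pyGetD xs i 0 ≠ PySem.List.pyGetD xs (i-1) 0 + 1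
        then (acc.1 ++ [PySem.List.pyGetD xs i 0], acc.2) else acc
      if i = n - 1 ∨ PySem.List.pyGetD xs i 0 ≠ PySem.List.pyGetD xs (i+1) 0 - 1
        then (acc.1, acc.2 ++ [PySem.List.pyGetD xs i 0]) else acc)
    ([], [])

-- ===== PORT B =====
-- literal transliteration of B: build the list of maximal consecutive runs, then map out
-- each run's first (r[0]) and last (r[-1]) element; runs and their members are nonempty,
-- so the pyGetD defaults are never returned.
def get_start_end_indices_alt (indices : List Int) : List Int × List Int :=
  let xs := PySem.List.sorted indices (fun x => x) false
  let runs := xs.foldl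
    (fun (runs : List (List Int)) v =>
      if runs ≠ [] ∧ v = PySem.List.pyGetD (PySem.List.pyGetD runs (-1) []) (-1) 0 + 1 then
        runs.dropLast ++ [PySem.List.pyGetD runs (-1) [] ++ [v]]
      else runs ++ [[v]]) []
  (runs.map (fun r => PySem.List.pyGetD r 0 0), runs.map (fun r => PySem.List.pyGetD r (-1) 0))

-- ===== PRECONDITION & SPEC =====
def Spec_get_start_end_indices (indices : List Int) (out : List Int × List Int) : Prop := out = get_start_end_indices_alt indices
instance (indices : List Int) (out : List Int × List Int) : Decidable (Spec_get_start_end_indices indices out) := by unfold Spec_get_start_end_indices; infer_instance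

-- ===== CLAIM (what is proved, stated in full; the proofs are below) =====
def Claim_equal_get_start_end_indices : Prop := ∀ (indices : List Int), Dom_get_start_end_indices indices → Spec_get_start_end_indices indices (get_start_end_indices indices)

-- ===== LEMMAS AND PROOFS =====

theorem pyGetD_at (xs u t : List Int) (p d : Int) (i : Int) (h : xs = u ++ p :: t)
    (hi : i = (u.length : Int)) : PySem.List.pyGetD xs i d = p := by
  subst h; subst hi
  rw [PySem.List.pyGetD_natCast]
  rw [List.getD_eq_getElem?_getD, List.getElem?_append_right (le_refl _)]
  simp

def goStarts (p : Int) : List Int → List Int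
  | [] => []
  | b :: t => if b = p + 1 then goStarts b t else b :: goStarts b t

theorem A_starts (t : List Int) : ∀ (u : List Int) (p : Int) (xs : List Int), xs = u ++ p :: t →
    (((PySem.List.pyRange ((u.length : Int) + 1) (xs.length : Int) 1).filter
        (fun i => decide (i = 0 ∨ PySem.List.pyGetD xs i 0 ≠ PySem.List.pyGetD xs (i-1) 0 + 1))).map
      (fun i => PySem.List.pyGetD xs i 0)) = goStarts p t := by
  induction t with
  | nil =>
    intro u p xs hxs
    rw [PySem.List.pyRange_one_eq_nil (by simp [hxs])]
    simp [goStarts]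
  | cons b t ih =>
    intro u p xs hxs
    have hlen : (xs.length : Int) = (u.length : Int) + (t.length + 2) := by
      subst hxs; push_cast [List.length_append, List.length_cons, List.length_nil]; omega
    rw [PySem.List.pyRange_one_cons (by omega), List.filter_cons]
    have h1 : PySem.List.pyGetD xs ((u.length : Int) + 1) 0 = b :=
      pyGetD_at xs (u ++ [p]) t b 0 _ (by simp [hxs]) (by push_cast [List.length_append, List.length_cons, List.length_nil]; omega)
    have h2 : PySem.List.pyGetD xs ((u.length : Int) + 1 - 1) 0 = p :=
      pyGetD_at xs u (b :: t) p 0 _ hxs (by ring)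
    have hih := ih (u ++ [p]) b xs (by simp [hxs])
    have hst : ((u ++ [p]).length : Int) + 1 = (u.length : Int) + 1 + 1 := by
      push_cast [List.length_append, List.length_cons, List.length_nil]; omega
    rw [hst] at hih
    by_cases hbp : b = p + 1
    · have hpred : decide ((u.length : Int) + 1 = 0 ∨
          PySem.List.pyGetD xs ((u.length : Int) + 1) 0 ≠ PySem.List.pyGetD xs ((u.length : Int) + 1 - 1) 0 + 1) = false := by
        simp only [h1, h2, decide_eq_false_iff_not]
        push Not
        exact ⟨by omega, hbp⟩
      rw [hpred]
      simp only [if_false, Bool.false_eq_true]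
      rw [hih]
      simp [goStarts, hbp]
    · have hpred : decide ((u.length : Int) + 1 = 0 ∨
          PySem.List.pyGetD xs ((u.length : Int) + 1) 0 ≠ PySem.List.pyGetD xs ((u.length : Int) + 1 - 1) 0 + 1) = true := by
        simp only [h1, h2, decide_eq_true_eq]
        exact Or.inr hbp
      rw [hpred]
      simp only [if_true]
      rw [List.map_cons, hih, h1]
      simp [goStarts, hbp]

def goEnds (p : Int) : List Int → List Int
  | [] => [p]
  | b :: t => if b = p + 1 then goEnds b t else p :: goEnds b t

theorem A_ends (t : List Int) : ∀ (u : List Int) (p : Int) (xs : List Int), xs = u ++ p :: t →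
    (((PySem.List.pyRange ((u.length : Int)) (xs.length : Int) 1).filter
        (fun i => decide (i = (xs.length : Int) - 1 ∨ PySem.List.pyGetD xs i 0 ≠ PySem.List.pyGetD xs (i+1) 0 - 1))).map
      (fun i => PySem.List.pyGetD xs i 0)) = goEnds p t := by
  induction t with
  | nil =>
    intro u p xs hxs
    have hlen : (xs.length : Int) = (u.length : Int) + 1 := by
      subst hxs; push_cast [List.length_append, List.length_cons, List.length_nil]; omega
    rw [PySem.List.pyRange_one_cons (by omega), PySem.List.pyRange_one_eq_nil (by omega),
      List.filter_cons]
    have hpred : decide ((u.length : Int) = (xs.length : Int) - 1 ∨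
        PySem.List.pyGetD xs ((u.length : Int)) 0 ≠ PySem.List.pyGetD xs ((u.length : Int) + 1) 0 - 1) = true := by
      simp only [decide_eq_true_eq]
      exact Or.inl (by omega)
    rw [hpred]
    simp only [if_true, List.filter_nil, List.map_cons, List.map_nil]
    rw [pyGetD_at xs u [] p 0 _ hxs rfl]
    simp [goEnds]
  | cons b t ih =>
    intro u p xs hxs
    have hlen : (xs.length : Int) = (u.length : Int) + (t.length + 2) := by
      subst hxs; push_cast [List.length_append, List.length_cons, List.length_nil]; omega
    rw [PySem.List.pyRange_one_cons (by omega), List.filter_cons]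
    have h1 : PySem.List.pyGetD xs ((u.length : Int)) 0 = p :=
      pyGetD_at xs u (b :: t) p 0 _ hxs rfl
    have h2 : PySem.List.pyGetD xs ((u.length : Int) + 1) 0 = b :=
      pyGetD_at xs (u ++ [p]) t b 0 _ (by simp [hxs])
        (by push_cast [List.length_append, List.length_cons, List.length_nil]; omega)
    have hih := ih (u ++ [p]) b xs (by simp [hxs])
    have hst : ((u ++ [p]).length : Int) = (u.length : Int) + 1 := by
      push_cast [List.length_append, List.length_cons, List.length_nil]; omega
    rw [hst] at hih
    by_cases hbp : b = p + 1
    · have hpred : decide ((u.length : Int) = (xs.length : Int) - 1 ∨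
          PySem.List.pyGetD xs ((u.length : Int)) 0 ≠ PySem.List.pyGetD xs ((u.length : Int) + 1) 0 - 1) = false := by
        simp only [h1, h2, decide_eq_false_iff_not]
        push Not
        exact ⟨by omega, by omega⟩
      rw [hpred]
      simp only [if_false, Bool.false_eq_true]
      rw [hih]
      simp [goEnds, hbp]
    · have hpred : decide ((u.length : Int) = (xs.length : Int) - 1 ∨
          PySem.List.pyGetD xs ((u.length : Int)) 0 ≠ PySem.List.pyGetD xs ((u.length : Int) + 1) 0 - 1) = true := by
        simp only [h1, h2, decide_eq_true_eq]
        exact Or.inr (by omega)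
      rw [hpred]
      simp only [if_true]
      rw [List.map_cons, hih, h1]
      simp [goEnds, hbp]

theorem pyGetD_concat_last {α : Type} (l : List α) (x d : α) :
    PySem.List.pyGetD (l ++ [x]) (-1) d = x := by
  simp [PySem.List.pyGetD, PySem.List.pyGet?, PySem.List.pyIdx?]

theorem pyGetD_concat_head (l : List Int) (hx : l ≠ []) (x d : Int) :
    PySem.List.pyGetD (l ++ [x]) 0 d = PySem.List.pyGetD l 0 d := by
  cases l with
  | nil => exact absurd rfl hx
  | cons a t =>
    simp [PySem.List.pyGetD, PySem.List.pyGet?, PySem.List.pyIdx?,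
      show (0:Int) ≤ (t.length:Int)+1 from by omega]

theorem B_fold (t : List Int) : ∀ (pre : List (List Int)) (r : List Int) (p : Int),
    ((t.foldl
      (fun (runs : List (List Int)) v =>
        if runs ≠ [] ∧ v = PySem.List.pyGetD (PySem.List.pyGetD runs (-1) []) (-1) 0 + 1 then
          runs.dropLast ++ [PySem.List.pyGetD runs (-1) [] ++ [v]]
        else runs ++ [[v]]) (pre ++ [r ++ [p]])).map (fun r => PySem.List.pyGetD r 0 0),
     (t.foldl
      (fun (runs : List (List Int)) v =>
        if runs ≠ [] ∧ v = PySem.List.pyGetD (PySem.List.pyGetD runs (-1) []) (-1) 0 + 1 then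
          runs.dropLast ++ [PySem.List.pyGetD runs (-1) [] ++ [v]]
        else runs ++ [[v]]) (pre ++ [r ++ [p]])).map (fun r => PySem.List.pyGetD r (-1) 0))
    = ((pre ++ [r ++ [p]]).map (fun r => PySem.List.pyGetD r 0 0) ++ goStarts p t,
       pre.map (fun r => PySem.List.pyGetD r (-1) 0) ++ goEnds p t) := by
  induction t with
  | nil =>
    intro pre r p
    simp [goStarts, goEnds]
  | cons b t ih =>
    intro pre r p
    simp only [List.foldl_cons]
    have hlast : PySem.List.pyGetD (pre ++ [r ++ [p]]) (-1) [] = r ++ [p] :=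
      pyGetD_concat_last _ _ _
    by_cases hbp : b = p + 1
    · rw [if_pos (by refine ⟨by simp, ?_⟩; rw [hlast, pyGetD_concat_last]; omega)]
      rw [hlast, List.dropLast_concat]
      rw [ih pre (r ++ [p]) b]
      have hf0 : PySem.List.pyGetD (r ++ [p] ++ [b]) 0 0 = PySem.List.pyGetD (r ++ [p]) 0 0 :=
        pyGetD_concat_head _ (by simp) _ _
      have hmap : (pre ++ [r ++ [p] ++ [b]]).map (fun r => PySem.List.pyGetD r 0 0)
          = (pre ++ [r ++ [p]]).map (fun r => PySem.List.pyGetD r 0 0) := by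
        simp only [List.map_append, List.map_cons, List.map_nil, hf0]
      rw [hmap]
      simp [goStarts, goEnds, hbp]
    · rw [if_neg (by rw [hlast, pyGetD_concat_last]; intro h; exact hbp h.2)]
      have := ih (pre ++ [r ++ [p]]) [] b
      simp only [List.nil_append, List.append_assoc, List.singleton_append] at this ⊢
      rw [this]
      simp [goStarts, goEnds, hbp, PySem.List.pyGetD, PySem.List.pyGet?, PySem.List.pyIdx?]

theorem folds_eq (xs : List Int) :
    (PySem.List.pyRange 0 (xs.length : Int) 1).foldl
      (fun (acc : List Int × List Int) i =>
        let acc := if i = 0 ∨ PySem.List.pyGetD xs i 0 ≠ PySem.List.pyGetD xs (i-1) 0 + 1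
          then (acc.1 ++ [PySem.List.pyGetD xs i 0], acc.2) else acc
        if i = (xs.length : Int) - 1 ∨ PySem.List.pyGetD xs i 0 ≠ PySem.List.pyGetD xs (i+1) 0 - 1
          then (acc.1, acc.2 ++ [PySem.List.pyGetD xs i 0]) else acc)
      ([], [])
    = ((xs.foldl
          (fun (runs : List (List Int)) v =>
            if runs ≠ [] ∧ v = PySem.List.pyGetD (PySem.List.pyGetD runs (-1) []) (-1) 0 + 1 then
              runs.dropLast ++ [PySem.List.pyGetD runs (-1) [] ++ [v]]
            else runs ++ [[v]]) []).map (fun r => PySem.List.pyGetD r 0 0),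
       (xs.foldl
          (fun (runs : List (List Int)) v =>
            if runs ≠ [] ∧ v = PySem.List.pyGetD (PySem.List.pyGetD runs (-1) []) (-1) 0 + 1 then
              runs.dropLast ++ [PySem.List.pyGetD runs (-1) [] ++ [v]]
            else runs ++ [[v]]) []).map (fun r => PySem.List.pyGetD r (-1) 0)) := by
  have hstep : (fun (acc : List Int × List Int) i =>
        let acc := if i = 0 ∨ PySem.List.pyGetD xs i 0 ≠ PySem.List.pyGetD xs (i-1) 0 + 1
          then (acc.1 ++ [PySem.List.pyGetD xs i 0], acc.2) else acc
        if i = (xs.length : Int) - 1 ∨ PySem.List.pyGetD xs i 0 ≠ PySem.List.pyGetD xs (i+1) 0 - 1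
          then (acc.1, acc.2 ++ [PySem.List.pyGetD xs i 0]) else acc)
      = fun (acc : List Int × List Int) i =>
        ((fun (a : List Int) (i : Int) =>
            if i = 0 ∨ PySem.List.pyGetD xs i 0 ≠ PySem.List.pyGetD xs (i-1) 0 + 1
            then a ++ [PySem.List.pyGetD xs i 0] else a) acc.1 i,
         (fun (a : List Int) (i : Int) =>
            if i = (xs.length : Int) - 1 ∨ PySem.List.pyGetD xs i 0 ≠ PySem.List.pyGetD xs (i+1) 0 - 1
            then a ++ [PySem.List.pyGetD xs i 0] else a) acc.2 i) := by
    funext acc i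
    dsimp only
    split_ifs <;> rfl
  rw [hstep, PySem.List.foldl_prod_mk
      (f := fun (a : List Int) (i : Int) =>
        if i = 0 ∨ PySem.List.pyGetD xs i 0 ≠ PySem.List.pyGetD xs (i-1) 0 + 1
        then a ++ [PySem.List.pyGetD xs i 0] else a)
      (g := fun (a : List Int) (i : Int) =>
        if i = (xs.length : Int) - 1 ∨ PySem.List.pyGetD xs i 0 ≠ PySem.List.pyGetD xs (i+1) 0 - 1
        then a ++ [PySem.List.pyGetD xs i 0] else a),
    PySem.List.foldl_append_ite, PySem.List.foldl_append_ite]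
  cases xs with
  | nil =>
    rw [PySem.List.pyRange_one_eq_nil (by simp)]
    simp
  | cons a t =>
    have hn : (0:Int) < ((a :: t).length : Int) := by simp
    have h0 : PySem.List.pyGetD (a :: t) 0 0 = a := pyGetD_at _ [] t a 0 0 rfl (by simp)
    have hS : (List.filter
          (fun x => decide (x = 0 ∨ PySem.List.pyGetD (a :: t) x 0 ≠ PySem.List.pyGetD (a :: t) (x - 1) 0 + 1))
          (PySem.List.pyRange 0 ((a :: t).length : Int))).map
            (fun i => PySem.List.pyGetD (a :: t) i 0) = a :: goStarts a t := by
      rw [PySem.List.pyRange_one_cons hn, List.filter_cons,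
        if_pos (show decide ((0:Int) = 0 ∨ PySem.List.pyGetD (a :: t) 0 0 ≠ PySem.List.pyGetD (a :: t) (0 - 1) 0 + 1) = true by simp),
        List.map_cons, h0]
      have hA := A_starts t [] a (a :: t) rfl
      simp only [List.length_nil, Nat.cast_zero, zero_add] at hA ⊢
      rw [hA]
    have hE : (List.filter
          (fun x => decide (x = ((a :: t).length : Int) - 1 ∨ PySem.List.pyGetD (a :: t) x 0 ≠ PySem.List.pyGetD (a :: t) (x + 1) 0 - 1))
          (PySem.List.pyRange 0 ((a :: t).length : Int))).map
            (fun i => PySem.List.pyGetD (a :: t) i 0) = goEnds a t := by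
      have hA := A_ends t [] a (a :: t) rfl
      simp only [List.length_nil, Nat.cast_zero] at hA
      exact hA
    -- B side: first iteration opens the first run
    simp only [List.foldl_cons]
    rw [if_neg (by simp)]
    have hB := B_fold t [] [] a
    simp only [List.nil_append] at hB ⊢
    rw [hS, hE, hB]
    simp [PySem.List.pyGetD, PySem.List.pyGet?, PySem.List.pyIdx?]


-- ===== VERDICT (by name: the statement is the Claim_ definition above) =====
theorem get_start_end_indices_spec : Claim_equal_get_start_end_indices := by
  intro indices _
  unfold Spec_get_start_end_indices get_start_end_indices get_start_end_indices_alt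
  exact folds_eq (PySem.List.sorted indices (fun x => x) false)
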